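-- pv_equiv track=rewrite | github.com/biotite-dev/biotite | src/biotite/structure/io/pdbx/cif.py | _to_single
-- ===== SOURCE A (Python) =====
-- def _to_single(lines):
--     r"""
--     Convert multiline values into singleline values
--     (in terms of 'lines' list elements).
--     Linebreaks are preserved as ``'\n'`` characters within a list element.
--     The initial ``';'`` character is also preserved, while the final ``';'`` character
--     is removed.
--     """
--     processed_lines = []
--     in_multi_line = False
--     mutli_line_value = []
--     for line in lines:
--         # Multiline value are enclosed by ';' at the start of the beginning and end line
--         if line[0] == ";":
--             if not in_multi_line:
--                 # Start of multiline value
--                 in_multi_line = True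
--                 mutli_line_value.append(line)
--             else:
--                 # End of multiline value
--                 in_multi_line = False
--                 # The current line contains only the end character ';'
--                 # Hence this line is not added to the processed lines
--                 processed_lines.append("\n".join(mutli_line_value))
--                 mutli_line_value = []
--         else:
--             if in_multi_line:
--                 mutli_line_value.append(line)
--             else:
--                 processed_lines.append(line)
--     return processed_lines
-- ===== SOURCE B (Python) =====
-- def _to_single(lines):
--     r"""Index-driven rewrite: on a ';' opener, scan forward for the closing
--     ';' line, emit the joined slice (closer dropped), and jump past it."""
--     processed_lines = []
--     i = 0
--     n = len(lines)
--     while i < n: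
--         if lines[i][0] == ";":
--             j = i + 1
--             while j < n and lines[j][0] != ";":
--                 j += 1
--             if j < n:
--                 processed_lines.append("\n".join(lines[i:j]))
--             i = j + 1
--         else:
--             processed_lines.append(lines[i])
--             i += 1
--     return processed_lines
-- ===== Notes on version B (the rewrite author's own statement) =====
-- stated objective: alternative
-- what changed: Replaces the boolean-flag state machine with a buffered accumulator by an index-driven loop whose inner forward scan finds the closing ';' line and emits the joined slice directly, with no in_multi_line flag and no mutable buffer.
import Mathlib
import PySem

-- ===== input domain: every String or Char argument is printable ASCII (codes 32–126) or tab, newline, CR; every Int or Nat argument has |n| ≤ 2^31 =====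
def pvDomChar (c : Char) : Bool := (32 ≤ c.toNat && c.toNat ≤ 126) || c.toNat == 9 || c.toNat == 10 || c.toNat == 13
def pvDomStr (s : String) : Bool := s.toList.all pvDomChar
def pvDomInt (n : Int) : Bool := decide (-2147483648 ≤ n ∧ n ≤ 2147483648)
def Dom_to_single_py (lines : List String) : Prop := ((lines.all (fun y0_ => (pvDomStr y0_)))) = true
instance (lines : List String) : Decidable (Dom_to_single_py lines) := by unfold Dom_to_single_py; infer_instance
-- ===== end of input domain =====

-- B replaces A's boolean-flag state machine (flag + mutable buffer) with an index-driven loop whose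
-- inner forward scan finds the closing ';' line and emits the joined slice directly (objective: alternative).
-- ===== PORT A =====
-- state: (processed_lines, in_multi_line, mutli_line_value); line[0] == ';' ported as head? on toList
-- (exact for the nonempty lines Pre_ admits; Python raises IndexError on an empty line).
def to_single_py (lines : List String) : List String :=
  (lines.foldl
    (fun (st : List String × Bool × List String) line =>
      if line.toList.head? = some ';' then
        if !st.2.1 then (st.1, true, st.2.2 ++ [line])
        else (st.1 ++ [PySem.Str.join "\n" st.2.2], false, [])
      else
        if st.2.1 then (st.1, st.2.1, st.2.2 ++ [line])
        else (st.1 ++ [line], st.2.1, st.2.2))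
    ([], false, [])).1

-- ===== PORT B =====
-- inner while loop: collect lines until the closing ';' line, returning (block, remainder)
-- or none if it runs off the end (Python: j reaches n, block discarded).
def bInner : List String → Option (List String × List String)
  | [] => none
  | l :: rest =>
    if l.toList.head? = some ';' then some ([], rest)
    else (bInner rest).map (fun p => (l :: p.1, p.2))

theorem bInner_length : ∀ (xs b r : List String), bInner xs = some (b, r) → r.length < xs.length := by
  intro xs
  induction xs with
  | nil => intro b r h; simp [bInner] at h
  | cons l rest ih =>
    intro b r h
    simp only [bInner] at h
    split at h
    · simp at h; simp [h.2]
    · cases hr : bInner rest with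
      | none => rw [hr] at h; simp at h
      | some p =>
        rw [hr] at h; simp at h
        have := ih p.1 p.2 (by rw [hr])
        simp [← h.2]; omega

def to_single_py_alt (lines : List String) : List String :=
  match lines with
  | [] => []
  | l :: rest =>
    if l.toList.head? = some ';' then
      match hb : bInner rest with
      | some (block, rest') =>
        PySem.Str.join "\n" (l :: block) :: to_single_py_alt rest'
      | none => []
    else l :: to_single_py_alt rest
termination_by lines.length
decreasing_by
  · have := bInner_length rest block rest' hb; simp; omega
  · simp

-- ===== PRECONDITION & SPEC =====
-- Pre_ excludes lists containing an empty line: Python A raises IndexError there (line[0]); B raises too.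
def Pre_to_single_py (lines : List String) : Prop := ∀ s ∈ lines, s ≠ ""
instance (lines : List String) : Decidable (Pre_to_single_py lines) := by unfold Pre_to_single_py; infer_instance
def pvWitness_to_single_py : List String := [";a", "b", ";", "c"]
def Spec_to_single_py (lines : List String) (out : List String) : Prop := out = to_single_py_alt lines
instance (lines : List String) (out : List String) : Decidable (Spec_to_single_py lines out) := by unfold Spec_to_single_py; infer_instance

-- ===== CLAIM =====
def Claim_equal_to_single_py : Prop := ∀ (lines : List String), Dom_to_single_py lines → Pre_to_single_py lines → Spec_to_single_py lines (to_single_py lines)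

-- ===== LEMMAS AND PROOFS =====

-- the fold in port A
def foldA (lines : List String) (st : List String × Bool × List String) : List String × Bool × List String :=
  lines.foldl
    (fun (st : List String × Bool × List String) line =>
      if line.toList.head? = some ';' then
        if !st.2.1 then (st.1, true, st.2.2 ++ [line])
        else (st.1 ++ [PySem.Str.join "\n" st.2.2], false, [])
      else
        if st.2.1 then (st.1, st.2.1, st.2.2 ++ [line])
        else (st.1 ++ [line], st.2.1, st.2.2)) st

theorem to_single_py_eq_foldA (lines : List String) :
    to_single_py lines = (foldA lines ([], false, [])).1 := rfl

-- mutual invariant, by strong induction on the list length: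
-- from the "outside a block" state the fold computes B's loop; from the "inside a block with
-- buffer m" state it computes the joined block (if closed) followed by B's loop on the rest.
theorem foldA_inv : ∀ (n : ℕ) (lines : List String), lines.length ≤ n →
    (∀ p, (foldA lines (p, false, [])).1 = p ++ to_single_py_alt lines) ∧
    (∀ p m, (foldA lines (p, true, m)).1 =
      match bInner lines with
      | some (b, r) => p ++ PySem.Str.join "\n" (m ++ b) :: to_single_py_alt r
      | none => p) := by
  intro n
  induction n with
  | zero =>
    intro lines h
    have : lines = [] := List.length_eq_zero_iff.mp (Nat.le_zero.mp h)
    subst this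
    constructor
    · intro p; simp [foldA, to_single_py_alt]
    · intro p m; simp [foldA, bInner]
  | succ k ih =>
    intro lines h
    cases lines with
    | nil =>
      constructor
      · intro p; simp [foldA, to_single_py_alt]
      · intro p m; simp [foldA, bInner]
    | cons l rest =>
      have hrest : rest.length ≤ k := by simp at h; omega
      constructor
      · intro p
        by_cases hl : l.toList.head? = some ';'
        · -- opener: fold enters the in-block state with buffer [l]
          have h2 := (ih rest hrest).2 p [l]
          simp only [foldA, List.foldl_cons, if_pos hl, Bool.not_false, Bool.false_eq_true,
            if_true, if_false, List.nil_append] at h2 ⊢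
          simp only [to_single_py_alt, if_pos hl]
          rw [h2]
          cases hb : bInner rest with
          | none => simp
          | some pr => obtain ⟨b, r⟩ := pr; simp
        · have h1 := (ih rest hrest).1 (p ++ [l])
          simp only [foldA, List.foldl_cons, if_neg hl, Bool.false_eq_true,
            if_true, if_false, List.nil_append] at h1 ⊢
          simp only [to_single_py_alt, if_neg hl]
          rw [h1]; simp
      · intro p m
        by_cases hl : l.toList.head? = some ';'
        · -- closer: block ends, fold returns to the plain state
          have h1 := (ih rest hrest).1 (p ++ [PySem.Str.join "\n" m])
          simp only [foldA, List.foldl_cons, if_pos hl, Bool.not_true, Bool.false_eq_true,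
            if_true, if_false, List.nil_append] at h1 ⊢
          rw [h1]
          simp [bInner, hl]
        · have h2 := (ih rest hrest).2 p (m ++ [l])
          simp only [foldA, List.foldl_cons, if_neg hl, if_true] at h2 ⊢
          rw [h2]
          simp only [bInner, if_neg hl]
          cases hb : bInner rest with
          | none => simp
          | some pr => obtain ⟨b, r⟩ := pr; simp

-- ===== VERDICT =====
theorem to_single_py_spec : Claim_equal_to_single_py := by
  intro lines _ _
  unfold Spec_to_single_py
  rw [to_single_py_eq_foldA]
  have := (foldA_inv lines.length lines le_rfl).1 []
  simpa using this
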